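-- pv_equiv track=rewrite | github.com/JewishKebab/terralabs | backend/aad_groups.py | derive_role_scope
-- ===== SOURCE A (Python) =====
-- def derive_role_scope(group_names):
--     """
--     From friendly group names, derive (role, course, section).
--     Rules:
--       - If any group contains 'asgard' (case-insensitive) => role 'asgard'
--       - 'segel-<course>[-<section>]' => role 'segel'
--       - 'students-<course>[-<section>]' => role 'student'
--       - otherwise 'unknown'
--     """
--     if not group_names:
--         return ("unknown", None, None)
--
--     # asgard override
--     for g in group_names:
--         if "asgard" in g.lower():
--             return ("asgard", None, None)
--
--     # teachers
--     for g in group_names: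
--         gl = g.lower()
--         if gl.startswith("segel"):
--             parts = g.split("-", 2)
--             role = "segel"
--             course = parts[1] if len(parts) > 1 else None
--             section = parts[2] if len(parts) > 2 else None
--             return (role, course, section)
--
--     # students
--     for g in group_names:
--         gl = g.lower()
--         if gl.startswith("students"):
--             parts = g.split("-", 2)
--             role = "student"
--             course = parts[1] if len(parts) > 1 else None
--             section = parts[2] if len(parts) > 2 else None
--             return (role, course, section)
--
--     return ("unknown", None, None)
-- ===== SOURCE B (Python) =====
-- def derive_role_scope(group_names):
--     first_segel = None
--     first_student = None
--     for g in group_names: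
--         gl = g.lower()
--         if "asgard" in gl:
--             return ("asgard", None, None)
--         if first_segel is None and gl.startswith("segel"):
--             parts = g.split("-", 2)
--             first_segel = ("segel",
--                            parts[1] if len(parts) > 1 else None,
--                            parts[2] if len(parts) > 2 else None)
--         if first_student is None and gl.startswith("students"):
--             parts = g.split("-", 2)
--             first_student = ("student",
--                              parts[1] if len(parts) > 1 else None,
--                              parts[2] if len(parts) > 2 else None)
--     if first_segel is not None:
--         return first_segel
--     if first_student is not None:
--         return first_student
--     return ("unknown", None, None)
-- ===== Notes on version B (the rewrite author's own statement) =====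
-- stated objective: simpler
-- what changed: Replaced A's three full scans of the list (asgard, then segel, then students) by a single pass that returns at once on an asgard hit and records the first segel and first students match in two accumulators, deciding at the end.
import Mathlib
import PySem

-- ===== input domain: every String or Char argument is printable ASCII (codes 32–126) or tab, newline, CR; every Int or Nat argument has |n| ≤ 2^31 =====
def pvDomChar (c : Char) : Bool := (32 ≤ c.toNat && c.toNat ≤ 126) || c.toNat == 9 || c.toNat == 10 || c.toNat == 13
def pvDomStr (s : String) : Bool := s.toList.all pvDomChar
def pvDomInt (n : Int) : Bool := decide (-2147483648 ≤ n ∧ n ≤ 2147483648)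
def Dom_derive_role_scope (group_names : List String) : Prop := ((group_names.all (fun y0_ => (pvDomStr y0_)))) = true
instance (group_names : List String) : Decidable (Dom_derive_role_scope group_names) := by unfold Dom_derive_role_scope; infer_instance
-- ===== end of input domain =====

-- B replaces A's three full scans by one pass with two first-match accumulators (simpler, same result).


-- ===== PORT A =====
-- first loop of A: return ("asgard", None, None) at the first g with "asgard" in g.lower()
def drsAsgardLoop : List String → Option (String × Option String × Option String)
  | [] => none
  | g :: rest =>
    if PySem.Str.isIn "asgard" (PySem.Str.lower g) then some ("asgard", none, none)
    else drsAsgardLoop rest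

-- second/third loop of A: first g whose lowercase starts with `pre`, parsed by split("-", 2)
-- ("-" ≠ "", so splitMax? is some; .getD [] is exact here)
def drsPrefixLoop (pre role : String) : List String → Option (String × Option String × Option String)
  | [] => none
  | g :: rest =>
    if PySem.Str.startswith (PySem.Str.lower g) pre then
      let parts := (PySem.Str.splitMax? g "-" 2).getD []
      some (role, PySem.List.pyGet? parts 1, PySem.List.pyGet? parts 2)
    else drsPrefixLoop pre role rest

def derive_role_scope (group_names : List String) : String × Option String × Option String :=
  if group_names = [] then ("unknown", none, none)
  else
    match drsAsgardLoop group_names with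
    | some r => r
    | none =>
      match drsPrefixLoop "segel" "segel" group_names with
      | some r => r
      | none =>
        match drsPrefixLoop "students" "student" group_names with
        | some r => r
        | none => ("unknown", none, none)

-- ===== PORT B =====
-- parts = g.split("-", 2); build (role, parts[1] if len>1 else None, parts[2] if len>2 else None)
def drsParse (role g : String) : String × Option String × Option String :=
  let parts := (PySem.Str.splitMax? g "-" 2).getD []
  (role, PySem.List.pyGet? parts 1, PySem.List.pyGet? parts 2)

-- B's single loop with the two accumulators first_segel / first_student
def drsLoop : List String → Option (String × Option String × Option String) →
    Option (String × Option String × Option String) → String × Option String × Option String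
  | [], fs, ft =>
    match fs with
    | some r => r
    | none =>
      match ft with
      | some r => r
      | none => ("unknown", none, none)
  | g :: rest, fs, ft =>
    let gl := PySem.Str.lower g
    if PySem.Str.isIn "asgard" gl then ("asgard", none, none)
    else
      drsLoop rest
        (if fs.isNone && PySem.Str.startswith gl "segel" then some (drsParse "segel" g) else fs)
        (if ft.isNone && PySem.Str.startswith gl "students" then some (drsParse "student" g) else ft)

def derive_role_scope_alt (group_names : List String) : String × Option String × Option String :=
  drsLoop group_names none none

-- ===== PRECONDITION & SPEC =====
def Spec_derive_role_scope (group_names : List String) (out : String × Option String × Option String) : Prop := out = derive_role_scope_alt group_names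
instance (group_names : List String) (out : String × Option String × Option String) : Decidable (Spec_derive_role_scope group_names out) := by unfold Spec_derive_role_scope; infer_instance

-- ===== CLAIM (what is proved, stated in full; the proofs are below) =====
def Claim_equal_derive_role_scope : Prop := ∀ (group_names : List String), Dom_derive_role_scope group_names → Spec_derive_role_scope group_names (derive_role_scope group_names)

-- ===== LEMMAS AND PROOFS =====

-- what B's loop computes, as a priority chain over the three scans and the accumulators
def drsRhs (l : List String) (fs ft : Option (String × Option String × Option String)) :
    String × Option String × Option String :=
  match drsAsgardLoop l with
  | some r => r
  | none =>
    match fs with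
    | some r => r
    | none =>
      match drsPrefixLoop "segel" "segel" l with
      | some r => r
      | none =>
        match ft with
        | some r => r
        | none =>
          match drsPrefixLoop "students" "student" l with
          | some r => r
          | none => ("unknown", none, none)

lemma drsLoop_eq_rhs (l : List String) (fs ft : Option (String × Option String × Option String)) :
    drsLoop l fs ft = drsRhs l fs ft := by
  induction l generalizing fs ft with
  | nil => cases fs <;> cases ft <;> rfl
  | cons g rest ih =>
    by_cases ha : PySem.Str.isIn "asgard" (PySem.Str.lower g) = true
    · simp only [drsLoop, drsRhs, drsAsgardLoop, ha, if_true]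
    · simp only [drsLoop, drsRhs, drsAsgardLoop, drsPrefixLoop, ha, if_false,
        Bool.false_eq_true]
      rw [ih]
      cases fs <;> cases ft <;>
        by_cases hs : PySem.Str.startswith (PySem.Str.lower g) "segel" = true <;>
        by_cases ht : PySem.Str.startswith (PySem.Str.lower g) "students" = true <;>
        simp only [drsRhs, drsParse, ha, hs, ht,
          Option.isNone_none, Option.isNone_some, Bool.true_and, Bool.false_and,
          if_true, if_false, Bool.false_eq_true]

theorem derive_role_scope_eq (group_names : List String) :
    derive_role_scope group_names = derive_role_scope_alt group_names := by
  rw [derive_role_scope_alt, drsLoop_eq_rhs]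
  cases group_names with
  | nil => simp [derive_role_scope, drsRhs, drsAsgardLoop, drsPrefixLoop]
  | cons g rest => rfl

-- ===== VERDICT (by name: the statement is the Claim_ definition above) =====
theorem derive_role_scope_spec : Claim_equal_derive_role_scope := by
  intro gs _
  exact derive_role_scope_eq gs
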